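-- pv_equiv track=rewrite | github.com/ThomasScottWhite/BehaviourClusteringRewrite | src/clustering/exporting/videos.py | precompute_next_prev_events
-- ===== SOURCE A (Python) =====
-- def precompute_next_prev_events(event_dicts, frames_to_process):
--     """
--     Precompute, for each event and each frame i, the indices of the previous
--     and next occurrences of that event. Returns two dictionaries:
--       prev_events[event_name][i] -> frame index of previous event or None
--       next_events[event_name][i] -> frame index of next event or None
--     """
--     prev_events = {}
--     next_events = {}
--
--     for event_name, frame_list in event_dicts.items():
--         # Sort the frame_list just in case
--         sorted_frames = sorted(frame_list)
--
--         # Initialize arrays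
--         prev_arr = [None] * frames_to_process
--         next_arr = [None] * frames_to_process
--
--         # Single pass to fill prev_arr:
--         #   We'll walk through sorted_frames and mark that for every
--         #   frame from sorted_frames[k] up to the next event, the "prev" is sorted_frames[k].
--         current_event_idx = 0
--         last_event_frame = None
--
--         for i in range(frames_to_process):
--             # Move forward in sorted_frames if we've passed the current event
--             while (
--                 current_event_idx < len(sorted_frames)
--                 and i >= sorted_frames[current_event_idx]
--             ):
--                 last_event_frame = sorted_frames[current_event_idx]
--                 current_event_idx += 1
--             prev_arr[i] = last_event_frame
--
--         # Single pass to fill next_arr (go from end -> start):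
--         current_event_idx = len(sorted_frames) - 1
--         next_event_frame = None
--
--         for i in reversed(range(frames_to_process)):
--             while current_event_idx >= 0 and i <= sorted_frames[current_event_idx]:
--                 next_event_frame = sorted_frames[current_event_idx]
--                 current_event_idx -= 1
--             next_arr[i] = next_event_frame
--
--         prev_events[event_name] = prev_arr
--         next_events[event_name] = next_arr
--
--     return prev_events, next_events
-- ===== SOURCE B (Python) =====
-- import bisect
--
-- def precompute_next_prev_events(event_dicts, frames_to_process):
--     """Per-frame binary search (bisect) into each event's sorted frame list,
--     instead of a two-pointer sweep."""
--     prev_events = {}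
--     next_events = {}
--     for event_name, frame_list in event_dicts.items():
--         sorted_frames = sorted(frame_list)
--         m = len(sorted_frames)
--         prev_arr = []
--         next_arr = []
--         for i in range(frames_to_process):
--             p = bisect.bisect_right(sorted_frames, i)
--             prev_arr.append(sorted_frames[p - 1] if p > 0 else None)
--             q = bisect.bisect_left(sorted_frames, i)
--             next_arr.append(sorted_frames[q] if q < m else None)
--         prev_events[event_name] = prev_arr
--         next_events[event_name] = next_arr
--     return prev_events, next_events
-- ===== Notes on version B (the rewrite author's own statement) =====
-- stated objective: idiomatic
-- what changed: Replaced A's two stateful monotone-pointer sweeps (forward for prev, backward for next) by a single loop that computes each frame independently with stdlib binary search (bisect_right for prev, bisect_left for next) into the sorted frame list.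
import Mathlib
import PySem

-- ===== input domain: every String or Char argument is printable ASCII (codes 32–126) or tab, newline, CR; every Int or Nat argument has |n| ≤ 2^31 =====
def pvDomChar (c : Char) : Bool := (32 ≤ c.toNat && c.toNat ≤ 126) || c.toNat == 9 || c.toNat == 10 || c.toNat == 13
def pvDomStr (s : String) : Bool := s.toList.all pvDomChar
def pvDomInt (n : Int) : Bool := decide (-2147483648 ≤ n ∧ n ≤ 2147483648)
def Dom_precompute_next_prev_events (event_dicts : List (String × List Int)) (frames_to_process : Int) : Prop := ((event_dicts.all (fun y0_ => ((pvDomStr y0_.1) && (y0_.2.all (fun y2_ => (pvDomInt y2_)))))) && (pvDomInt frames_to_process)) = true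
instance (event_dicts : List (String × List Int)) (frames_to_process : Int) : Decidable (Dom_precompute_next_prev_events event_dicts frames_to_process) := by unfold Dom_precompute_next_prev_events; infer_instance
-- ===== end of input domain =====

-- B replaces A's two monotone-pointer sweeps by an independent per-frame binary search
-- (bisect_right for prev, bisect_left for next) into the sorted frame list (objective: idiomatic; not faster).

-- ===== PORT A =====

-- the inner `while` of the prev pass: advance the pointer while i >= sorted_frames[idx]
def advPrev (S : List Int) (i : Int) (idx : Nat) (last : Option Int) : Nat × Option Int :=
  if h : idx < S.length then
    if S[idx] ≤ i then advPrev S i (idx + 1) (some S[idx]) else (idx, last)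
  else (idx, last)
termination_by S.length - idx
decreasing_by omega

-- `for i in range(frames_to_process)` filling prev_arr (collected in order, as the Python
-- assigns prev_arr[i] for i = 0,1,…, which builds the same list)
def prevLoopA (S : List Int) (n : Int) : List (Option Int) :=
  ((PySem.List.pyRange 0 n 1).foldl
    (fun (st : Nat × Option Int × List (Option Int)) i =>
      let r := advPrev S i st.1 st.2.1
      (r.1, r.2, st.2.2 ++ [r.2]))
    (0, none, [])).2.2

-- the inner `while` of the next pass: while idx >= 0 and i <= sorted_frames[idx]
-- (the `none` arm of the match is a totality guard only: idx < len(S) throughout the run)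
def advNext (S : List Int) (i : Int) (idx : Int) (nxt : Option Int) : Int × Option Int :=
  if _h0 : 0 ≤ idx then
    match PySem.List.pyGet? S idx with
    | some v => if i ≤ v then advNext S i (idx - 1) (some v) else (idx, nxt)
    | none => (idx, nxt)
  else (idx, nxt)
termination_by (idx + 1).toNat
decreasing_by omega

-- `for i in reversed(range(frames_to_process))` filling next_arr back to front
def nextLoopA (S : List Int) (n : Int) : List (Option Int) :=
  ((PySem.List.pyRange 0 n 1).reverse.foldl
    (fun (st : Int × Option Int × List (Option Int)) i =>
      let r := advNext S i st.1 st.2.1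
      (r.1, r.2, r.2 :: st.2.2))
    ((S.length : Int) - 1, none, [])).2.2

def precompute_next_prev_events (event_dicts : List (String × List Int)) (frames_to_process : Int) : (List (String × List (Option Int))) × (List (String × List (Option Int))) :=
  let r := event_dicts.foldl
    (fun (st : PySem.Dict String (List (Option Int)) × PySem.Dict String (List (Option Int))) p =>
      let S := PySem.List.sorted p.2 (fun x => x)
      (st.1.insert p.1 (prevLoopA S frames_to_process),
       st.2.insert p.1 (nextLoopA S frames_to_process)))
    (PySem.Dict.empty, PySem.Dict.empty)
  (r.1.items, r.2.items)

-- ===== PORT B =====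

-- the single `for i in range(frames_to_process)` loop of B, appending to both arrays
def bothLoopB (S : List Int) (n : Int) : List (Option Int) × List (Option Int) :=
  (PySem.List.pyRange 0 n 1).foldl
    (fun (st : List (Option Int) × List (Option Int)) i =>
      let p := PySem.List.bisectRight S i
      let q := PySem.List.bisectLeft S i
      (st.1 ++ [if 0 < p then S[p - 1]? else none],
       st.2 ++ [if q < S.length then S[q]? else none]))
    ([], [])

def precompute_next_prev_events_alt (event_dicts : List (String × List Int)) (frames_to_process : Int) : (List (String × List (Option Int))) × (List (String × List (Option Int))) :=
  let r := event_dicts.foldl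
    (fun (st : PySem.Dict String (List (Option Int)) × PySem.Dict String (List (Option Int))) p =>
      let S := PySem.List.sorted p.2 (fun x => x)
      let pq := bothLoopB S frames_to_process
      (st.1.insert p.1 pq.1, st.2.insert p.1 pq.2))
    (PySem.Dict.empty, PySem.Dict.empty)
  (r.1.items, r.2.items)

-- ===== PRECONDITION & SPEC =====
def Spec_precompute_next_prev_events (event_dicts : List (String × List Int)) (frames_to_process : Int) (out : (List (String × List (Option Int))) × (List (String × List (Option Int)))) : Prop := out = precompute_next_prev_events_alt event_dicts frames_to_process
instance (event_dicts : List (String × List Int)) (frames_to_process : Int) (out : (List (String × List (Option Int))) × (List (String × List (Option Int)))) : Decidable (Spec_precompute_next_prev_events event_dicts frames_to_process out) := by unfold Spec_precompute_next_prev_events; infer_instance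

-- ===== CLAIM (what is proved, stated in full; the proofs are below) =====
def Claim_equal_precompute_next_prev_events : Prop := ∀ (event_dicts : List (String × List Int)) (frames_to_process : Int), Dom_precompute_next_prev_events event_dicts frames_to_process → Spec_precompute_next_prev_events event_dicts frames_to_process (precompute_next_prev_events event_dicts frames_to_process)

-- ===== LEMMAS AND PROOFS =====

-- the common per-frame values: prev = largest frame ≤ i, next = smallest frame ≥ i
def pvVal (S : List Int) (i : Int) : Option Int :=
  if 0 < PySem.List.bisectRight S i then S[PySem.List.bisectRight S i - 1]? else none

def nvVal (S : List Int) (i : Int) : Option Int :=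
  if PySem.List.bisectLeft S i < S.length then S[PySem.List.bisectLeft S i]? else none

theorem pairFold (L : List Int) (f g : Int → Option Int) :
    ∀ (a b : List (Option Int)),
      L.foldl (fun (st : List (Option Int) × List (Option Int)) i =>
        (st.1 ++ [f i], st.2 ++ [g i])) (a, b) = (a ++ L.map f, b ++ L.map g) := by
  induction L with
  | nil => intro a b; simp
  | cons x t ih => intro a b; simp [List.foldl_cons, ih]

theorem bothLoopB_eq (S : List Int) (n : Int) :
    bothLoopB S n = ((PySem.List.pyRange 0 n 1).map (pvVal S),
                     (PySem.List.pyRange 0 n 1).map (nvVal S)) := by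
  unfold bothLoopB pvVal nvVal
  exact pairFold _ _ _ [] []

theorem advPrev_spec (S : List Int) (hS : S.Pairwise (· ≤ ·)) (i : Int) :
    ∀ (k idx : Nat), S.length - idx ≤ k → idx ≤ S.length →
      (∀ j (hj : j < S.length), j < idx → S[j] ≤ i) →
      advPrev S i idx (if 0 < idx then S[idx - 1]? else none)
        = (PySem.List.bisectRight S i, pvVal S i) := by
  intro k
  induction k with
  | zero =>
      intro idx hk hle hall
      obtain ⟨h1, h2, h3⟩ := PySem.List.bisectRight_spec S i hS
      have hidx : idx = S.length := by omega
      rw [advPrev]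
      have hbr : PySem.List.bisectRight S i = idx := by
        by_contra hne
        have hlt : PySem.List.bisectRight S i < idx := by omega
        have := h3 (PySem.List.bisectRight S i) (by omega) (le_refl _)
        have := hall (PySem.List.bisectRight S i) (by omega) hlt
        omega
      simp [hidx, hbr, pvVal]
  | succ k ih =>
      intro idx hk hle hall
      obtain ⟨h1, h2, h3⟩ := PySem.List.bisectRight_spec S i hS
      rw [advPrev]
      by_cases hlen : idx < S.length
      · simp only [hlen, dite_true]
        by_cases hcmp : S[idx] ≤ i
        · simp only [hcmp, if_true]
          have heq : some S[idx] = (if 0 < idx + 1 then S[idx + 1 - 1]? else none) := by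
            simp
          rw [heq]
          exact ih (idx + 1) (by omega) (by omega)
            (fun j hj hlt => by
              rcases Nat.lt_or_ge j idx with h | h
              · exact hall j hj h
              · have : j = idx := by omega
                subst this; exact hcmp)
        · simp only [hcmp, if_false]
          have hbr : PySem.List.bisectRight S i = idx := by
            by_contra hne
            rcases Nat.lt_or_ge (PySem.List.bisectRight S i) idx with h | h
            · have := h3 (PySem.List.bisectRight S i) (by omega) (le_refl _)
              have := hall (PySem.List.bisectRight S i) (by omega) h
              omega
            · have hgt : idx < PySem.List.bisectRight S i := by omega
              have := h2 idx hlen hgt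
              omega
          simp [hbr, pvVal]
      · simp only [hlen, dite_false]
        have hidx : idx = S.length := by omega
        have hbr : PySem.List.bisectRight S i = idx := by
          by_contra hne
          have hlt : PySem.List.bisectRight S i < idx := by omega
          have := h3 (PySem.List.bisectRight S i) (by omega) (le_refl _)
          have := hall (PySem.List.bisectRight S i) (by omega) hlt
          omega
        simp [hbr, pvVal]

theorem prevFold (S : List Int) (hS : S.Pairwise (· ≤ ·)) :
    ∀ (m : Nat) (a b : Int) (idx : Nat) (arr : List (Option Int)),
      (b - a).toNat ≤ m → idx ≤ S.length →
      (∀ j (hj : j < S.length), j < idx → S[j] < a) →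
      ((PySem.List.pyRange a b 1).foldl
        (fun (st : Nat × Option Int × List (Option Int)) i =>
          let r := advPrev S i st.1 st.2.1
          (r.1, r.2, st.2.2 ++ [r.2]))
        (idx, (if 0 < idx then S[idx - 1]? else none), arr)).2.2
      = arr ++ (PySem.List.pyRange a b 1).map (pvVal S) := by
  intro m
  induction m with
  | zero =>
      intro a b idx arr hm hle hall
      rw [PySem.List.pyRange_one_eq_nil (by omega)]
      simp
  | succ m ih =>
      intro a b idx arr hm hle hall
      by_cases hab : b ≤ a
      · rw [PySem.List.pyRange_one_eq_nil hab]; simp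
      · rw [PySem.List.pyRange_one_cons (by omega)]
        simp only [List.foldl_cons, List.map_cons]
        have hstep := advPrev_spec S hS a S.length idx (by omega) hle
          (fun j hj hlt => le_of_lt (hall j hj hlt))
        rw [hstep]
        obtain ⟨h1, h2, h3⟩ := PySem.List.bisectRight_spec S a hS
        have := ih (a + 1) b (PySem.List.bisectRight S a) (arr ++ [pvVal S a])
          (by omega) h1
          (fun j hj hlt => by have := h2 j hj hlt; omega)
        simp only [pvVal] at this ⊢
        rw [this]
        simp

theorem prevLoopA_eq (S : List Int) (hS : S.Pairwise (· ≤ ·)) (n : Int) :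
    prevLoopA S n = (PySem.List.pyRange 0 n 1).map (pvVal S) := by
  unfold prevLoopA
  have := prevFold S hS (n - 0).toNat 0 n 0 [] (le_refl _) (by omega)
    (fun j hj hlt => by omega)
  simpa using this

theorem advNext_spec (S : List Int) (hS : S.Pairwise (· ≤ ·)) (i : Int) :
    ∀ (c : Nat), c ≤ S.length →
      (∀ j (hj : j < S.length), c ≤ j → i ≤ S[j]) →
      advNext S i ((c : Int) - 1) (if c < S.length then S[c]? else none)
        = ((PySem.List.bisectLeft S i : Int) - 1, nvVal S i) := by
  intro c
  induction c with
  | zero =>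
      intro hle hall
      obtain ⟨h1, h2, h3⟩ := PySem.List.bisectLeft_spec S i hS
      rw [advNext]
      have hbl : PySem.List.bisectLeft S i = 0 := by
        by_contra hne
        have hpos : 0 < PySem.List.bisectLeft S i := by omega
        have := h2 0 (by omega) hpos
        have := hall 0 (by omega) (by omega)
        omega
      simp [hbl, nvVal]
  | succ c ih =>
      intro hle hall
      obtain ⟨h1, h2, h3⟩ := PySem.List.bisectLeft_spec S i hS
      rw [advNext]
      have hcast : ((c + 1 : Nat) : Int) - 1 = (c : Int) := by push_cast; ring
      rw [hcast]
      have hclen : c < S.length := by omega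
      have hget : PySem.List.pyGet? S (c : Int) = some S[c] :=
        PySem.List.pyGet?_ofNat S c hclen
      simp only [Int.natCast_nonneg, dite_true, hget]
      by_cases hcmp : i ≤ S[c]
      · simp only [hcmp, if_true]
        have heq : some S[c] = (if c < S.length then S[c]? else none) := by
          simp [hclen]
        rw [heq]
        exact ih (by omega)
          (fun j hj hge => by
            rcases Nat.lt_or_ge j (c + 1) with h | h
            · have : j = c := by omega
              subst this; exact hcmp
            · exact hall j hj h)
      · simp only [hcmp, if_false]
        have hbl : PySem.List.bisectLeft S i = c + 1 := by
          by_contra hne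
          rcases Nat.lt_or_ge (PySem.List.bisectLeft S i) (c + 1) with h | h
          · have := h3 c hclen (by omega)
            omega
          · have hgt : c + 1 < PySem.List.bisectLeft S i := by omega
            have := h2 (c + 1) (by omega) hgt
            have := hall (c + 1) (by omega) (le_refl _)
            omega
        rw [hbl]
        simp [nvVal, hbl]

theorem nextFold (S : List Int) (hS : S.Pairwise (· ≤ ·)) :
    ∀ (m : Nat) (a b : Int) (c : Nat) (arr : List (Option Int)),
      (b - a).toNat ≤ m → c ≤ S.length →
      (∀ j (hj : j < S.length), c ≤ j → b ≤ S[j]) →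
      (((PySem.List.pyRange a b 1).reverse).foldl
        (fun (st : Int × Option Int × List (Option Int)) i =>
          let r := advNext S i st.1 st.2.1
          (r.1, r.2, r.2 :: st.2.2))
        ((c : Int) - 1, (if c < S.length then S[c]? else none), arr)).2.2
      = (PySem.List.pyRange a b 1).map (nvVal S) ++ arr := by
  intro m
  induction m with
  | zero =>
      intro a b c arr hm hle hall
      rw [PySem.List.pyRange_one_eq_nil (by omega)]
      simp
  | succ m ih =>
      intro a b c arr hm hle hall
      by_cases hab : b ≤ a
      · rw [PySem.List.pyRange_one_eq_nil hab]; simp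
      · have hb : b = (b - 1) + 1 := by ring
        rw [hb, PySem.List.pyRange_one_succ_right (by omega)]
        simp only [List.reverse_append, List.reverse_cons, List.reverse_nil,
          List.nil_append, List.singleton_append, List.foldl_cons, List.map_append]
        have hstep := advNext_spec S hS (b - 1) c hle
          (fun j hj hge => by have := hall j hj hge; omega)
        rw [hstep]
        obtain ⟨h1, h2, h3⟩ := PySem.List.bisectLeft_spec S (b - 1) hS
        have := ih a (b - 1) (PySem.List.bisectLeft S (b - 1)) (nvVal S (b - 1) :: arr)
          (by omega) h1
          (fun j hj hge => h3 j hj hge)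
        simp only [nvVal] at this ⊢
        rw [this]
        simp [nvVal]

theorem nextLoopA_eq (S : List Int) (hS : S.Pairwise (· ≤ ·)) (n : Int) :
    nextLoopA S n = (PySem.List.pyRange 0 n 1).map (nvVal S) := by
  unfold nextLoopA
  have := nextFold S hS (n - 0).toNat 0 n S.length [] (le_refl _) (le_refl _)
    (fun j hj hge => by omega)
  simp only [lt_self_iff_false, if_false] at this
  simpa using this

theorem sorted_pairwise_le (l : List Int) :
    (PySem.List.sorted l (fun x => x)).Pairwise (· ≤ ·) := by
  have := PySem.List.sorted_pairwise l (fun x => x)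
  simpa using this

theorem perEvent (fl : List Int) (n : Int) :
    (prevLoopA (PySem.List.sorted fl (fun x => x)) n,
     nextLoopA (PySem.List.sorted fl (fun x => x)) n)
      = bothLoopB (PySem.List.sorted fl (fun x => x)) n := by
  have hS := sorted_pairwise_le fl
  rw [bothLoopB_eq, prevLoopA_eq _ hS, nextLoopA_eq _ hS]

theorem precompute_next_prev_events_spec : Claim_equal_precompute_next_prev_events := by
  unfold Claim_equal_precompute_next_prev_events
  intro event_dicts frames_to_process _
  unfold Spec_precompute_next_prev_events
  unfold precompute_next_prev_events precompute_next_prev_events_alt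
  have hfun : (fun (st : PySem.Dict String (List (Option Int)) × PySem.Dict String (List (Option Int))) (p : String × List Int) =>
      let S := PySem.List.sorted p.2 (fun x => x)
      (st.1.insert p.1 (prevLoopA S frames_to_process),
       st.2.insert p.1 (nextLoopA S frames_to_process)))
    = (fun (st : PySem.Dict String (List (Option Int)) × PySem.Dict String (List (Option Int))) (p : String × List Int) =>
      let S := PySem.List.sorted p.2 (fun x => x)
      let pq := bothLoopB S frames_to_process
      (st.1.insert p.1 pq.1, st.2.insert p.1 pq.2)) := by
    funext st p
    have h := perEvent p.2 frames_to_process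
    simp only []
    rw [← h]
  rw [hfun]
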